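-- pv_equiv track=rewrite | github.com/PanicAThePython/grafos | trab01.py | isDirigido
-- ===== SOURCE A (Python) =====
-- def isDirigido(matriz):
--     dirigido = False
--     for linha in range(matriz.__len__()):
--         for coluna in range(matriz.__len__()):
--             if coluna == matriz.__len__()-1 and linha == matriz.__len__()-1:
--                 break
--             if (matriz[linha][coluna]!=matriz[coluna][linha]):
--                dirigido = True
--     return dirigido
-- ===== SOURCE B (Python) =====
-- def isDirigido(matriz):
--     n = len(matriz)
--     transposta = [[matriz[j][i] for j in range(n)] for i in range(n)]
--     return matriz != transposta
-- ===== Notes on version B (the rewrite author's own statement) =====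
-- stated objective: idiomatic
-- what changed: B builds the transpose as its own matrix and returns a single structural comparison matriz != transposta, instead of A's nested index loops that toggle a flag cell by cell (with a break that only skips the last diagonal cell).
-- outside the precondition, e.g. on isDirigido([[1, 2, 9], [2, 4, 8]]): A returns False, B returns True
import Mathlib
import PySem

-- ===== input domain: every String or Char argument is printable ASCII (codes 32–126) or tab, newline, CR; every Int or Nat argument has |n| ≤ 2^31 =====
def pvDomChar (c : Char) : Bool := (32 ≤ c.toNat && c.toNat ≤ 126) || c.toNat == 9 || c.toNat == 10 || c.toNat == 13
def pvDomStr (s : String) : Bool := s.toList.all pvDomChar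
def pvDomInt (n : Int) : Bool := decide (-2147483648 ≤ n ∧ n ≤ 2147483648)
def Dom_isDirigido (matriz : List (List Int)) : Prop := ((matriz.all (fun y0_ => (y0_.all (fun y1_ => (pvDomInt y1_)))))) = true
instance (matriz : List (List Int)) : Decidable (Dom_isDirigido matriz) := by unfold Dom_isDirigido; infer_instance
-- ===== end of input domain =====

-- B replaces A's nested index loops and mutable flag by building the transpose and one structural comparison (idiomatic; same cost).


-- ===== PORT A =====
-- inner 'for coluna in range(n)' loop, with the break at (coluna, linha) = (n-1, n-1)
def isDirigidoInner (matriz : List (List Int)) (linha : Int) : List Int → Bool → Bool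
  | [], dirigido => dirigido
  | coluna :: rest, dirigido =>
    if coluna = (matriz.length : Int) - 1 ∧ linha = (matriz.length : Int) - 1 then dirigido
    else isDirigidoInner matriz linha rest
      (if PySem.List.pyGetD (PySem.List.pyGetD matriz linha []) coluna 0
          ≠ PySem.List.pyGetD (PySem.List.pyGetD matriz coluna []) linha 0 then true else dirigido)

def isDirigido (matriz : List (List Int)) : Bool :=
  (PySem.List.pyRange 0 (matriz.length : Int) 1).foldl
    (fun dirigido linha =>
      isDirigidoInner matriz linha (PySem.List.pyRange 0 (matriz.length : Int) 1) dirigido)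
    false

-- ===== PORT B =====
def isDirigido_alt (matriz : List (List Int)) : Bool :=
  let n : Int := (matriz.length : Int)
  let transposta : List (List Int) :=
    (PySem.List.pyRange 0 n 1).map (fun i =>
      (PySem.List.pyRange 0 n 1).map (fun j =>
        PySem.List.pyGetD (PySem.List.pyGetD matriz j []) i 0))
  decide (matriz ≠ transposta)

-- ===== PRECONDITION & SPEC =====
-- Pre_ restricts to square matrices: on a matrix with a row shorter than len(matriz) the Python A raises
-- IndexError, and on a ragged matrix whose rows are longer than len(matriz) A silently ignores the entries
-- beyond column len(matriz)-1 (an artefact of its index loops), a corner no caller with an adjacency matrix hits.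
def Pre_isDirigido (matriz : List (List Int)) : Prop :=
  ∀ row ∈ matriz, row.length = matriz.length
instance (matriz : List (List Int)) : Decidable (Pre_isDirigido matriz) := by unfold Pre_isDirigido; infer_instance

def pvWitness_isDirigido : List (List Int) := [[0, 1, 0], [2, 0, 0], [0, 0, 5]]

def Spec_isDirigido (matriz : List (List Int)) (out : Bool) : Prop := out = isDirigido_alt matriz
instance (matriz : List (List Int)) (out : Bool) : Decidable (Spec_isDirigido matriz out) := by unfold Spec_isDirigido; infer_instance

-- ===== CLAIM (what is proved, stated in full; the proofs are below) =====
def Claim_equal_isDirigido : Prop := ∀ (matriz : List (List Int)), Dom_isDirigido matriz → Pre_isDirigido matriz → Spec_isDirigido matriz (isDirigido matriz)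

-- ===== LEMMAS AND PROOFS =====

-- shared shorthand for the entry both ports read at (i, j)
def pvG (m : List (List Int)) (i j : Nat) : Int := (m.getD i []).getD j 0

-- 'if test: flag = True' as a boolean 'or'
theorem pv_if_true_or (p : Prop) [Decidable p] (d : Bool) :
    (if p then true else d) = (d || decide p) := by
  by_cases h : p <;> simp [h]

-- a fold that only ever sets the flag is the 'or' of the flag with 'any'
theorem pv_foldl_or {α : Type} (f : α → Bool) (xs : List α) (d : Bool) :
    xs.foldl (fun acc x => acc || f x) d = (d || xs.any f) := by
  induction xs generalizing d with
  | nil => simp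
  | cons x xs ih => simp [List.foldl_cons, ih, Bool.or_assoc]

-- the inner loop, when no element of the list triggers the break, is a plain or-fold
theorem pv_inner_no_break (m : List (List Int)) (l : Int) (cs : List Int) (d : Bool)
    (h : ∀ c ∈ cs, ¬(c = (m.length : Int) - 1 ∧ l = (m.length : Int) - 1)) :
    isDirigidoInner m l cs d =
      (d || cs.any (fun c => decide (PySem.List.pyGetD (PySem.List.pyGetD m l []) c 0
          ≠ PySem.List.pyGetD (PySem.List.pyGetD m c []) l 0))) := by
  induction cs generalizing d with
  | nil => simp [isDirigidoInner]
  | cons c cs ih =>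
    simp only [isDirigidoInner]
    rw [if_neg (h c (by simp)), pv_if_true_or,
      ih _ (fun c hc => h c (by simp [hc])), Bool.or_assoc]
    simp

-- the inner loop with the break element appended at the end drops exactly that element
theorem pv_inner_break_last (m : List (List Int)) (l : Int) (cs : List Int) (d : Bool)
    (hl : l = (m.length : Int) - 1)
    (h : ∀ c ∈ cs, c ≠ (m.length : Int) - 1) :
    isDirigidoInner m l (cs ++ [(m.length : Int) - 1]) d = isDirigidoInner m l cs d := by
  induction cs generalizing d with
  | nil => simp [isDirigidoInner, hl]
  | cons c cs ih =>
    have hc : ¬(c = (m.length : Int) - 1 ∧ l = (m.length : Int) - 1) :=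
      fun hh => h c (by simp) hh.1
    simp only [List.cons_append, isDirigidoInner]
    rw [if_neg hc, if_neg hc]
    exact ih _ (fun c hc' => h c (List.mem_cons_of_mem _ hc'))

-- A is the or over all index pairs: the break only skips the last diagonal cell, whose test is vacuous
theorem pv_A_any (m : List (List Int)) :
    isDirigido m = (PySem.List.pyRange 0 (m.length : Int) 1).any (fun l =>
      (PySem.List.pyRange 0 (m.length : Int) 1).any (fun c =>
        decide (PySem.List.pyGetD (PySem.List.pyGetD m l []) c 0
          ≠ PySem.List.pyGetD (PySem.List.pyGetD m c []) l 0))) := by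
  unfold isDirigido
  rw [PySem.List.foldl_congr_mem _ _
    (fun d l => d || (PySem.List.pyRange 0 (m.length : Int) 1).any (fun c =>
        decide (PySem.List.pyGetD (PySem.List.pyGetD m l []) c 0
          ≠ PySem.List.pyGetD (PySem.List.pyGetD m c []) l 0))) false ?hcong]
  · rw [pv_foldl_or]; simp
  case hcong =>
    intro d l hl
    obtain ⟨hl0, hlN⟩ := PySem.List.mem_pyRange_one.mp hl
    by_cases hend : l = (m.length : Int) - 1
    · have hsplit : PySem.List.pyRange 0 (m.length : Int) 1
          = PySem.List.pyRange 0 ((m.length : Int) - 1) 1 ++ [(m.length : Int) - 1] := by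
        have h1 := PySem.List.pyRange_one_succ_right (a := 0) (b := (m.length : Int) - 1) (by omega)
        rw [show (m.length : Int) - 1 + 1 = (m.length : Int) by ring] at h1
        exact h1
      rw [hsplit,
        pv_inner_break_last m l _ d hend
          (fun c hc => by have := PySem.List.mem_pyRange_one.mp hc; omega),
        pv_inner_no_break m l _ d
          (fun c hc hh => by have := PySem.List.mem_pyRange_one.mp hc; omega)]
      subst hend
      simp
    · exact pv_inner_no_break m l _ d (fun c hc hh => hend hh.2)

theorem pv_A_true_iff (m : List (List Int)) :
    isDirigido m = true ↔
      ∃ i < m.length, ∃ j < m.length, pvG m i j ≠ pvG m j i := by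
  rw [pv_A_any]
  simp only [List.any_eq_true, PySem.List.mem_pyRange_one, decide_eq_true_eq]
  constructor
  · rintro ⟨l, ⟨hl0, hlN⟩, c, ⟨hc0, hcN⟩, hp⟩
    refine ⟨l.toNat, by omega, c.toNat, by omega, ?_⟩
    rwa [pvG, pvG, ← PySem.List.pyGetD_of_nonneg m [] hl0, ← PySem.List.pyGetD_of_nonneg m [] hc0,
      ← PySem.List.pyGetD_of_nonneg _ 0 hc0, ← PySem.List.pyGetD_of_nonneg _ 0 hl0]
  · rintro ⟨i, hi, j, hj, hp⟩
    refine ⟨(i : Int), ⟨by positivity, by exact_mod_cast hi⟩,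
      (j : Int), ⟨by positivity, by exact_mod_cast hj⟩, ?_⟩
    simpa [pvG] using hp

-- B's transpose, with the Int ranges turned into Nat ranges
theorem pv_T_eq (m : List (List Int)) :
    isDirigido_alt m = decide (m ≠ (List.range m.length).map (fun i =>
      (List.range m.length).map (fun j => pvG m j i))) := by
  unfold isDirigido_alt
  simp [PySem.List.pyRange_zero_nat, Function.comp_def, pvG]

-- on a square matrix, equality with the transpose is entrywise symmetry
theorem pv_eq_T_iff (m : List (List Int)) (hsq : ∀ row ∈ m, row.length = m.length) :
    m = (List.range m.length).map (fun i => (List.range m.length).map (fun j => pvG m j i)) ↔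
      ∀ i < m.length, ∀ j < m.length, pvG m i j = pvG m j i := by
  constructor
  · intro h i hi j hj
    have hrow : m.getD i [] = (List.range m.length).map (fun j => pvG m j i) := by
      conv_lhs => rw [h]
      simp [List.getD_eq_getElem?_getD, hi]
    rw [pvG, hrow]
    simp [List.getD_eq_getElem?_getD, hj]
  · intro h
    apply List.ext_getElem (by simp)
    intro i h1 h2
    have hi : i < m.length := h1
    have hlen : m[i].length = m.length := hsq _ (List.getElem_mem h1)
    simp only [List.getElem_map, List.getElem_range]
    apply List.ext_getElem (by simpa using hlen)
    intro j hj1 hj2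
    have hj : j < m.length := by simpa using hj2
    rw [List.getElem_map, List.getElem_range]
    rw [show m[i][j] = pvG m i j by
      rw [pvG, List.getD_eq_getElem m [] hi, List.getD_eq_getElem _ 0 (by omega)]]
    exact h i hi j hj

-- characterisation of B on square matrices
theorem pv_B_true_iff (m : List (List Int)) (hsq : ∀ row ∈ m, row.length = m.length) :
    isDirigido_alt m = true ↔
      ∃ i < m.length, ∃ j < m.length, pvG m i j ≠ pvG m j i := by
  rw [pv_T_eq, decide_eq_true_iff, Ne, pv_eq_T_iff m hsq]
  push Not
  rfl

-- ===== VERDICT (by name: the statement is the Claim_ definition above) =====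
theorem isDirigido_spec : Claim_equal_isDirigido := by
  intro m _ hpre
  unfold Spec_isDirigido
  rw [Bool.eq_iff_iff, pv_A_true_iff m, pv_B_true_iff m hpre]
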